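-- pv_equiv track=rewrite | github.com/standardebooks/tools | se/commands/import_text.py | _paragraphs_from_lines
-- ===== SOURCE A (Python) =====
-- def _paragraphs_from_lines(lines: list[str]) -> str:
-- 	"""
-- 	Convert plain text lines into <p> elements.
-- 	Blank lines separate paragraphs.
-- 	"""
--
-- 	paragraphs: list[str] = []
-- 	current: list[str] = []
--
-- 	for line in lines:
-- 		stripped = line.strip()
-- 		if stripped == "":
-- 			if current:
-- 				paragraphs.append(" ".join(current))
-- 				current = []
-- 		else:
-- 			current.append(_escape_xml(stripped))
--
-- 	if current:
-- 		paragraphs.append(" ".join(current))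
--
-- 	return "\n\t\t\t\t".join(f"<p>{p}</p>" for p in paragraphs)
--
-- def _escape_xml(text: str) -> str:
-- 	"""Escape XML special characters in text content."""
-- 	text = text.replace("&", "&amp;")
-- 	text = text.replace("<", "&lt;")
-- 	text = text.replace(">", "&gt;")
-- 	return text
-- ===== SOURCE B (Python) =====
-- def _escape_xml(text: str) -> str:
-- 	"""Escape XML special characters in text content."""
-- 	text = text.replace("&", "&amp;")
-- 	text = text.replace("<", "&lt;")
-- 	text = text.replace(">", "&gt;")
-- 	return text
--
--
-- def _split_run(rest: list[str]) -> tuple[list[str], list[str]]: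
-- 	"""Split rest into its leading run of non-blank lines and the remainder."""
-- 	for k, s in enumerate(rest):
-- 		if s == "":
-- 			return rest[:k], rest[k:]
-- 	return rest, []
--
--
-- def _paragraphs_from_lines(lines: list[str]) -> str:
-- 	"""
-- 	Convert plain text lines into <p> elements.
-- 	Blank lines separate paragraphs.
-- 	"""
-- 	stripped = [line.strip() for line in lines]
-- 	paragraphs = []
-- 	rest = stripped
-- 	while rest:
-- 		if rest[0] == "":
-- 			rest = rest[1:]
-- 		else:
-- 			run, rest = _split_run(rest)
-- 			paragraphs.append(" ".join(_escape_xml(s) for s in run))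
-- 	return "\n\t\t\t\t".join(f"<p>{p}</p>" for p in paragraphs)
-- ===== Notes on version B (the rewrite author's own statement) =====
-- stated objective: alternative
-- what changed: Replaces A's stateful current/paragraphs accumulator with its post-loop flush by a run splitter: strip all lines first, then repeatedly peel off the leading run of non-blank lines (no flush needed), joining each run into a paragraph.
import Mathlib
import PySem

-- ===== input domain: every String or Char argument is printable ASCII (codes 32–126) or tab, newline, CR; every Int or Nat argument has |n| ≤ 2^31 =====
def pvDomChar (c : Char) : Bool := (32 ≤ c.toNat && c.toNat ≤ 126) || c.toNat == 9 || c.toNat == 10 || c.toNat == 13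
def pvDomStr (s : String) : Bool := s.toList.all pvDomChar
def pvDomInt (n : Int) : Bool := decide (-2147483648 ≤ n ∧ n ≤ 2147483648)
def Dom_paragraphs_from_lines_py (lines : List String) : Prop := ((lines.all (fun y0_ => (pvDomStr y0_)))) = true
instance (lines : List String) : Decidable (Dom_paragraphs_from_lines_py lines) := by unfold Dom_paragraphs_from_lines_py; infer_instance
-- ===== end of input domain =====

-- B replaces A's current/paragraphs accumulator (with its post-loop flush) by a run splitter over the
-- pre-stripped lines: repeatedly peel off the leading run of non-blank lines (objective: alternative).

-- ===== PORT A =====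
-- _escape_xml, shared verbatim by both Python sources
def pyEscapeXml (text : String) : String :=
  PySem.Str.replace (PySem.Str.replace (PySem.Str.replace text "&" "&amp;") "<" "&lt;") ">" "&gt;"

-- the body of A's for-loop; state = (paragraphs, current)
def stepA (acc : List String × List String) (line : String) : List String × List String :=
  let stripped := PySem.Str.strip line
  if stripped = "" then
    if acc.2 ≠ [] then (acc.1 ++ [PySem.Str.join " " acc.2], []) else acc
  else (acc.1, acc.2 ++ [pyEscapeXml stripped])

def paragraphs_from_lines_py (lines : List String) : String :=
  let r := lines.foldl stepA ([], [])
  let paragraphs := if r.2 ≠ [] then r.1 ++ [PySem.Str.join " " r.2] else r.1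
  PySem.Str.join "\n\t\t\t\t" (paragraphs.map (fun p => "<p>" ++ p ++ "</p>"))

-- ===== PORT B =====
-- _split_run: leading run of non-blank lines and the remainder (rest[:k], rest[k:] of the first blank)
def altSplitRun : List String → List String × List String
  | [] => ([], [])
  | s :: ss => if s = "" then ([], s :: ss)
               else ((altSplitRun ss).1.cons s, (altSplitRun ss).2)

theorem altSplitRun_snd_len : ∀ ss : List String, (altSplitRun ss).2.length ≤ ss.length := by
  intro ss
  induction ss with
  | nil => simp [altSplitRun]
  | cons s ss ih =>
    by_cases h : s = "" <;> simp [altSplitRun, h]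
    omega

-- B's while loop: collect the paragraph of each run
def altParas : List String → List String
  | [] => []
  | s :: ss =>
    if s = "" then altParas ss
    else PySem.Str.join " " ((s :: (altSplitRun ss).1).map pyEscapeXml) :: altParas (altSplitRun ss).2
termination_by ss => ss.length
decreasing_by
  · simp
  · have h2 := altSplitRun_snd_len ss
    simp only [List.length_cons]
    omega

def paragraphs_from_lines_py_alt (lines : List String) : String :=
  let stripped := lines.map PySem.Str.strip
  let paragraphs := altParas stripped
  PySem.Str.join "\n\t\t\t\t" (paragraphs.map (fun p => "<p>" ++ p ++ "</p>"))

-- ===== PRECONDITION & SPEC =====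
def Spec_paragraphs_from_lines_py (lines : List String) (out : String) : Prop := out = paragraphs_from_lines_py_alt lines
instance (lines : List String) (out : String) : Decidable (Spec_paragraphs_from_lines_py lines out) := by unfold Spec_paragraphs_from_lines_py; infer_instance

-- ===== CLAIM (what is proved, stated in full; the proofs are below) =====
def Claim_equal_paragraphs_from_lines_py : Prop := ∀ (lines : List String), Dom_paragraphs_from_lines_py lines → Spec_paragraphs_from_lines_py lines (paragraphs_from_lines_py lines)

-- ===== LEMMAS AND PROOFS =====

-- A's step on an already-stripped line
def stepS (acc : List String × List String) (s : String) : List String × List String :=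
  if s = "" then
    if acc.2 ≠ [] then (acc.1 ++ [PySem.Str.join " " acc.2], []) else acc
  else (acc.1, acc.2 ++ [pyEscapeXml s])

-- what A's fold-then-flush yields from state (paras, cur) on remaining stripped lines ss
def hAux : List String → List String → List String
  | cur, [] => if cur ≠ [] then [PySem.Str.join " " cur] else []
  | cur, s :: ss =>
    if s = "" then
      (if cur ≠ [] then PySem.Str.join " " cur :: hAux [] ss else hAux [] ss)
    else hAux (cur ++ [pyEscapeXml s]) ss

theorem flush_foldS : ∀ (ss paras cur : List String),
    (let r := List.foldl stepS (paras, cur) ss;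
     if r.2 ≠ [] then r.1 ++ [PySem.Str.join " " r.2] else r.1) = paras ++ hAux cur ss := by
  intro ss
  induction ss with
  | nil =>
    intro paras cur
    by_cases h : cur = [] <;> simp [hAux, h]
  | cons s ss ih =>
    intro paras cur
    by_cases hs : s = ""
    · by_cases hc : cur = []
      · simpa [stepS, hs, hc, hAux] using ih paras []
      · have := ih (paras ++ [PySem.Str.join " " cur]) []
        simp [stepS, hs, hc, hAux, this]
    · simpa [stepS, hs, hAux] using ih paras (cur ++ [pyEscapeXml s])

theorem hAux_eq_altParas : ∀ (ss cur : List String),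
    hAux cur ss =
      if cur = [] then altParas ss
      else PySem.Str.join " " (cur ++ ((altSplitRun ss).1).map pyEscapeXml) :: altParas (altSplitRun ss).2 := by
  intro ss
  induction ss with
  | nil =>
    intro cur
    by_cases h : cur = [] <;> simp [hAux, altSplitRun, altParas, h]
  | cons s ss ih =>
    intro cur
    by_cases hs : s = ""
    · have h0 := ih []
      by_cases hc : cur = [] <;>
        simp [hAux, hs, hc, altSplitRun, altParas, h0]
    · have h1 := ih (cur ++ [pyEscapeXml s])
      have hne : cur ++ [pyEscapeXml s] ≠ [] := by simp
      rw [if_neg hne] at h1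
      by_cases hc : cur = []
      · subst hc
        simp only [List.nil_append] at h1
        simp [hAux, hs, altParas, h1]
      · simp [hAux, hs, hc, altSplitRun, h1, List.append_assoc]

-- ===== VERDICT (by name: the statement is the Claim_ definition above) =====
theorem paragraphs_from_lines_py_spec : Claim_equal_paragraphs_from_lines_py := by
  intro lines _
  unfold Spec_paragraphs_from_lines_py paragraphs_from_lines_py paragraphs_from_lines_py_alt
  have hstep : stepA = fun x y => stepS x (PySem.Str.strip y) := rfl
  have hfold : lines.foldl stepA ([], []) = (lines.map PySem.Str.strip).foldl stepS ([], []) := by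
    rw [List.foldl_map, hstep]
  have h1 := flush_foldS (lines.map PySem.Str.strip) [] []
  have h2 := hAux_eq_altParas (lines.map PySem.Str.strip) []
  simp only [hfold]
  simp only at h1
  rw [h1]
  simp [h2]
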